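-- pv_equiv track=rewrite | github.com/parasiitism/AlgoDaily | codeforces/1742e/main.py | solve
-- ===== SOURCE A (Python) =====
-- def solve(steps, queries):
--     n = len(steps)
--
--     cur_max_step = 0                # running max
--     reachable_heights = {}          # {running max: prefix sum}
--     pfs = 0
--     for i in range(n):
--         s = steps[i]
--         cur_max_step = max(cur_max_step, s)
--         pfs += s
--         if cur_max_step not in reachable_heights:
--             reachable_heights[cur_max_step] = 0
--         reachable_heights[cur_max_step] = pfs
--
--     # prepare for binary search
--     pairs = []
--     keys = list(reachable_heights.keys())
--     keys.sort()
--     for k in keys: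
--         pairs.append([k, reachable_heights[k]])
--
--     # binary search the max height for a Query can reach
--     res = []
--     for q in queries:
--         idx = upper_bsearch(pairs, q) - 1
--         if idx < 0:
--             res.append(0)
--         else:
--             h = pairs[idx][1]
--             res.append(h)
--     return res
--
-- def upper_bsearch(pairs, q):
--     left = 0
--     right = len(pairs)
--     while left < right:
--         mid = (left + right) // 2
--         if q >= pairs[mid][0]:
--             left = mid + 1
--         else:
--             right = mid
--     return left
-- ===== SOURCE B (Python) =====
-- def solve(steps, queries):
--     # Simpler: for each query, walk the staircase directly, tracking the max
--     # step needed so far; stop as soon as it exceeds the query's power.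
--     res = []
--     for q in queries:
--         need = 0
--         total = 0
--         for s in steps:
--             need = max(need, s)
--             if need > q:
--                 break
--             total += s
--         res.append(total)
--     return res
-- ===== Notes on version B (the rewrite author's own statement) =====
-- stated objective: simpler
-- what changed: B drops the dict of running-max thresholds, the key sort and the per-query binary search entirely: for each query it walks the step list once, tracking the running max needed and the prefix sum, stopping at the first step whose running max exceeds the query.
import Mathlib
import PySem

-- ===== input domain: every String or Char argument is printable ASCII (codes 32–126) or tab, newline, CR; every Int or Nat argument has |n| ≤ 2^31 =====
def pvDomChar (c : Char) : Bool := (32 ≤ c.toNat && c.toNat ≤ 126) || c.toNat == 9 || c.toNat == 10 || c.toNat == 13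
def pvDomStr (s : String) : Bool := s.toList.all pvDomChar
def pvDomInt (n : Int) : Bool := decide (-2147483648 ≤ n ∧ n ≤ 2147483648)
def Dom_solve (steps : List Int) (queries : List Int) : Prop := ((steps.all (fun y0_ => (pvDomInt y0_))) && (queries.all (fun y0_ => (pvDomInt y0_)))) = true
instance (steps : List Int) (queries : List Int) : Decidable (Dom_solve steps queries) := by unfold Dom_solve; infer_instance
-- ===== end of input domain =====

-- B replaces A's dict of thresholds + key sort + per-query binary search by a
-- per-query single walk over the steps (running max needed, prefix sum); objective: simpler.

-- ===== PORT A =====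
-- upper_bsearch: the 'while left < right' loop, as recursion on right - left.
-- pairs[mid] is always in range when left < right ≤ len(pairs), so List.getD is exact here.
def upperBsearch (pairs : List (Int × Int)) (q : Int) (left right : Nat) : Nat :=
  if _h : left < right then
    let mid := (left + right) / 2
    if q ≥ (pairs.getD mid (0, 0)).1 then upperBsearch pairs q (mid + 1) right
    else upperBsearch pairs q left mid
  else left
termination_by right - left
decreasing_by all_goals omega

-- body of A's first for-loop (state: cur_max_step, pfs, reachable_heights)
def stepA (st : Int × Int × PySem.Dict Int Int) (s : Int) : Int × Int × PySem.Dict Int Int :=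
  let curMax := max st.1 s
  let pfs := st.2.1 + s
  let d := st.2.2
  let d := if d.contains curMax then d else d.insert curMax 0
  let d := d.insert curMax pfs
  (curMax, pfs, d)

def solve (steps : List Int) (queries : List Int) : List Int :=
  let st := steps.foldl stepA (0, 0, PySem.Dict.empty)
  let d := st.2.2
  let keys := PySem.List.sorted d.keys (fun x => x) false
  -- reachable_heights[k] never raises here (every k ∈ keys is a dict key); (get? k).getD 0 is exact on that domain
  let pairs := keys.foldl (fun ps k => ps ++ [(k, (d.get? k).getD 0)]) []
  queries.foldl
    (fun res q =>
      let idx : Int := (upperBsearch pairs q 0 pairs.length : Int) - 1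
      if idx < 0 then res ++ [0]
      else res ++ [(pairs.getD idx.toNat (0, 0)).2])
    []

-- ===== PORT B =====
-- B's inner for-loop with break, as structural recursion over steps
def altGo (q : Int) (need total : Int) : List Int → Int
  | [] => total
  | s :: rest =>
    let need' := max need s
    if need' > q then total else altGo q need' (total + s) rest

def solve_alt (steps : List Int) (queries : List Int) : List Int :=
  queries.map (fun q => altGo q 0 0 steps)

-- ===== PRECONDITION & SPEC =====
def Spec_solve (steps : List Int) (queries : List Int) (out : List Int) : Prop := out = solve_alt steps queries
instance (steps : List Int) (queries : List Int) (out : List Int) : Decidable (Spec_solve steps queries out) := by unfold Spec_solve; infer_instance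

-- ===== CLAIM (what is proved, stated in full; the proofs are below) =====
def Claim_equal_solve : Prop := ∀ (steps : List Int) (queries : List Int), Dom_solve steps queries → Spec_solve steps queries (solve steps queries)

-- ===== LEMMAS AND PROOFS =====

-- value of the last pair whose threshold is ≤ q (0 if none): what A's binary-search step returns
def lastH (ps : List (Int × Int)) (q : Int) : Int :=
  (((ps.takeWhile (fun p => decide (p.1 ≤ q))).getLast?).map Prod.snd).getD 0

theorem tw_append_stop (l : List (Int × Int)) (p : Int × Int → Bool) (x : Int × Int) (hx : p x = false) :
    (l ++ [x]).takeWhile p = l.takeWhile p := by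
  rw [List.takeWhile_append]; split
  · next h => rw [(List.takeWhile_prefix p).eq_of_length h]; simp [List.takeWhile, hx]
  · rfl

theorem lastH_append_gt (B : List (Int × Int)) (k v q : Int) (h : q < k) :
    lastH (B ++ [(k, v)]) q = lastH B q := by
  unfold lastH
  rw [tw_append_stop _ _ _ (by simp; omega)]

theorem lastH_all (items : List (Int × Int)) (cm pfs q : Int)
    (h2 : ∀ p ∈ items, p.1 ≤ cm)
    (h3 : items.getLast? = some (cm, pfs) ∨ (items = [] ∧ pfs = 0))
    (hq : cm ≤ q) : lastH items q = pfs := by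
  unfold lastH
  rw [List.takeWhile_eq_self_iff.mpr (fun p hp => by simp; exact le_trans (h2 p hp) hq)]
  rcases h3 with h | ⟨h, rfl⟩
  · rw [h]; rfl
  · rw [h]; rfl

theorem altGo_of_lt (q need total : Int) (l : List Int) (h : q < need) :
    altGo q need total l = total := by
  cases l with
  | nil => rfl
  | cons s rest => simp only [altGo]; rw [if_pos (by omega)]

-- invariant of A's first loop: the dict's items are the (threshold, height) table,
-- strictly increasing in threshold, last entry (cur_max, pfs); querying it = B's walk
theorem fold_inv (steps : List Int) :
    ∀ (cm pfs : Int) (d : PySem.Dict Int Int),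
    (d.items.map Prod.fst).Pairwise (· < ·) →
    (∀ p ∈ d.items, p.1 ≤ cm) →
    (d.items.getLast? = some (cm, pfs) ∨ (d.items = [] ∧ pfs = 0)) →
    (((steps.foldl stepA (cm, pfs, d)).2.2.items.map Prod.fst).Pairwise (· < ·)) ∧
    (∀ q, lastH (steps.foldl stepA (cm, pfs, d)).2.2.items q
        = if cm ≤ q then altGo q cm pfs steps else lastH d.items q) := by
  induction steps with
  | nil =>
      intro cm pfs d h1 h2 h3
      refine ⟨h1, fun q => ?_⟩
      simp only [List.foldl_nil]
      split
      · next hq => simp only [altGo]; exact lastH_all d.items cm pfs q h2 h3 hq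
      · rfl
  | cons s rest ih =>
      intro cm pfs d h1 h2 h3
      obtain ⟨B, hB, hBpw, hBlt, hlow, hmid⟩ :
          ∃ B : List (Int × Int),
            (stepA (cm, pfs, d) s).2.2.items = B ++ [(max cm s, pfs + s)] ∧
            (B.map Prod.fst).Pairwise (· < ·) ∧
            (∀ p ∈ B, p.1 < max cm s) ∧
            (∀ q, q < cm → lastH (B ++ [(max cm s, pfs + s)]) q = lastH d.items q) ∧
            (∀ q, cm ≤ q → q < max cm s → lastH (B ++ [(max cm s, pfs + s)]) q = pfs) := by
        by_cases hc : d.contains (max cm s) = true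
        · -- key already present: max cm s = cm, it is the last key; overwrite in place
          have hmem : max cm s ∈ d.items.map Prod.fst := by
            have := PySem.Dict.contains_eq_decide_mem_keys d (max cm s)
            rw [hc] at this
            have : max cm s ∈ d.keys := by simpa using this.symm
            simpa [PySem.Dict.keys] using this
          obtain ⟨p, hp, hpk⟩ := List.mem_map.mp hmem
          have hcm : max cm s = cm := le_antisymm (hpk ▸ h2 p hp) (le_max_left _ _)
          have hne : d.items ≠ [] := by intro h; rw [h] at hp; exact absurd hp (List.not_mem_nil)
          have h3' : d.items.getLast? = some (cm, pfs) := by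
            rcases h3 with h | ⟨h, _⟩
            · exact h
            · exact absurd h hne
          obtain ⟨init, hinit⟩ := List.getLast?_eq_some_iff.mp h3'
          have hinitlt : ∀ p ∈ init, p.1 < cm := by
            intro p hp
            have := h1
            rw [hinit, List.map_append, List.pairwise_append] at this
            simpa using this.2.2 p.1 (List.mem_map_of_mem hp)
          refine ⟨init, ?_, ?_, ?_, ?_, ?_⟩
          · simp only [stepA, if_pos hc]
            rw [PySem.Dict.items_insert_of_contains d (pfs + s) hc, hinit, List.map_append]
            congr 1
            · have : List.map (fun p => if (p.1 == max cm s) = true then (max cm s, pfs + s) else p) init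
                  = List.map id init :=
                List.map_congr_left (fun p hp => by
                  rw [if_neg]
                  · rfl
                  · simp only [beq_iff_eq]
                    exact fun h => absurd (h ▸ hinitlt p hp) (by rw [hcm]; exact lt_irrefl _))
              rw [this, List.map_id]
            · simp [hcm]
          · have := h1; rw [hinit, List.map_append, List.pairwise_append] at this; exact this.1
          · intro p hp; rw [hcm]; exact hinitlt p hp
          · intro q hq
            rw [lastH_append_gt _ _ _ _ (by omega), hinit, lastH_append_gt _ _ _ _ (by omega)]
          · intro q hq1 hq2; rw [hcm] at hq2; omega
        · -- new key: appended at the end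
          have hnotmem : max cm s ∉ d.items.map Prod.fst := by
            intro hmem
            have := PySem.Dict.contains_eq_decide_mem_keys d (max cm s)
            rw [Bool.not_eq_true] at hc
            rw [hc] at this
            have : max cm s ∉ d.keys := by simpa using this.symm
            exact this (by simpa [PySem.Dict.keys] using hmem)
          refine ⟨d.items, ?_, h1, ?_, ?_, ?_⟩
          · simp only [stepA, if_neg hc]
            have hc0 : (d.insert (max cm s) (0 : Int)).contains (max cm s) = true :=
              PySem.Dict.contains_insert_self d _ _
            rw [PySem.Dict.items_insert_of_contains _ (pfs + s) hc0,
                PySem.Dict.items_insert_of_not_contains d 0 (Bool.not_eq_true _ |>.mp hc),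
                List.map_append]
            congr 1
            · have : List.map (fun p => if (p.1 == max cm s) = true then (max cm s, pfs + s) else p) d.items
                  = List.map id d.items :=
                List.map_congr_left (fun p hp => by
                  rw [if_neg]
                  · rfl
                  · simp only [beq_iff_eq]
                    exact fun h => hnotmem (h ▸ List.mem_map_of_mem hp))
              rw [this, List.map_id]
            · simp
          · intro p hp
            have hle : p.1 ≤ cm := h2 p hp
            have hne : p.1 ≠ max cm s := fun h => hnotmem (h ▸ List.mem_map_of_mem hp)
            have : cm ≤ max cm s := le_max_left _ _
            omega
          · intro q hq
            rw [lastH_append_gt _ _ _ _ (by omega)]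
          · intro q hq1 hq2
            rw [lastH_append_gt _ _ _ _ hq2]
            exact lastH_all d.items cm pfs q h2 h3 hq1
      -- invariants for the new state, then the tail of the fold via the IH
      have h1' : ((stepA (cm, pfs, d) s).2.2.items.map Prod.fst).Pairwise (· < ·) := by
        rw [hB, List.map_append, List.pairwise_append]
        refine ⟨hBpw, List.pairwise_singleton _ _, fun a ha b hb => ?_⟩
        obtain ⟨p, hp, rfl⟩ := List.mem_map.mp ha
        have hb' : b = max cm s := by simpa using hb
        subst hb'
        exact hBlt p hp
      have h2' : ∀ p ∈ (stepA (cm, pfs, d) s).2.2.items, p.1 ≤ max cm s := by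
        rw [hB]; intro p hp
        rcases List.mem_append.mp hp with h | h
        · exact le_of_lt (hBlt p h)
        · simp only [List.mem_singleton] at h; rw [h]
      have h3' : (stepA (cm, pfs, d) s).2.2.items.getLast? = some (max cm s, pfs + s) ∨
          ((stepA (cm, pfs, d) s).2.2.items = [] ∧ pfs + s = 0) := by
        left; rw [hB]; exact List.getLast?_concat
      have hst : stepA (cm, pfs, d) s = (max cm s, pfs + s, (stepA (cm, pfs, d) s).2.2) := by
        simp only [stepA]
      obtain ⟨hpwF, hqF⟩ := ih (max cm s) (pfs + s) (stepA (cm, pfs, d) s).2.2 h1' h2' h3'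
      constructor
      · simpa only [List.foldl_cons, ← hst] using hpwF
      · intro q
        have hgoal := hqF q
        rw [show (s :: rest).foldl stepA (cm, pfs, d) = rest.foldl stepA (stepA (cm, pfs, d) s) from rfl,
            hst] at *
        rw [hgoal]
        by_cases hq1 : max cm s ≤ q
        · rw [if_pos hq1, if_pos (le_trans (le_max_left cm s) hq1)]
          simp only [altGo]
          rw [if_neg (by omega)]
        · rw [if_neg hq1]
          by_cases hq2 : cm ≤ q
          · rw [if_pos hq2, hB, hmid q hq2 (by omega)]
            simp only [altGo]
            rw [if_pos (by omega)]
          · rw [if_neg hq2, hB, hlow q (by omega)]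

-- the takeWhile length is pinned down by its boundary
theorem tw_length_eq (ps : List (Int × Int)) (q : Int) (n : Nat) (hn : n ≤ ps.length)
    (h1 : ∀ i (h : i < ps.length), i < n → ps[i].1 ≤ q)
    (h2 : ∀ (h : n < ps.length), q < ps[n].1) :
    (ps.takeWhile (fun p => decide (p.1 ≤ q))).length = n := by
  induction ps generalizing n with
  | nil => exact (Nat.le_zero.mp (by simpa using hn)).symm
  | cons p tail ih =>
      cases n with
      | zero =>
          have hlt := h2 (by simp)
          have hq : ¬ p.1 ≤ q := by simp at hlt; omega
          simp only [List.takeWhile]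
          rw [decide_eq_false hq]
          rfl
      | succ m =>
          have hp : p.1 ≤ q := by simpa using h1 0 (by simp) (by omega)
          simp only [List.takeWhile]
          rw [decide_eq_true hp]
          simp only [List.length_cons, Nat.add_left_inj]
          exact ih m (by simpa using hn)
            (fun i hi him => by simpa using h1 (i + 1) (by simpa using hi) (by omega))
            (fun h => by simpa using h2 (by simpa using h))

theorem ub_spec (n : Nat) : ∀ (ps : List (Int × Int)) (q : Int),
    (∀ i j (hi : i < ps.length) (hj : j < ps.length), i < j → ps[i].1 < ps[j].1) →
    ∀ l r, r - l ≤ n → l ≤ r → r ≤ ps.length →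
    (∀ i (h : i < ps.length), i < l → ps[i].1 ≤ q) →
    (∀ i (h : i < ps.length), r ≤ i → q < ps[i].1) →
    upperBsearch ps q l r = (ps.takeWhile (fun p => decide (p.1 ≤ q))).length := by
  induction n with
  | zero =>
      intro ps q hmono l r hfuel hlr hrlen hlo hhi
      have : l = r := by omega
      rw [upperBsearch, dif_neg (by omega)]
      exact (tw_length_eq ps q l (by omega) hlo (fun h => hhi l h (by omega))).symm
  | succ n ihn =>
      intro ps q hmono l r hfuel hlr hrlen hlo hhi
      rw [upperBsearch]
      by_cases hlt : l < r
      · rw [dif_pos hlt]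
        show (if q ≥ (ps.getD ((l + r) / 2) (0, 0)).1 then upperBsearch ps q ((l + r) / 2 + 1) r
              else upperBsearch ps q l ((l + r) / 2))
            = (ps.takeWhile (fun p => decide (p.1 ≤ q))).length
        have hmid1 : l ≤ (l + r) / 2 := by omega
        have hmid2 : (l + r) / 2 < r := by omega
        have hmlen : (l + r) / 2 < ps.length := by omega
        rw [List.getD_eq_getElem ps (0, 0) hmlen]
        split
        · next hge =>
            apply ihn ps q hmono ((l + r) / 2 + 1) r (by omega) (by omega) hrlen
            · intro i hi him
              rcases Nat.lt_or_ge i ((l + r) / 2) with h | h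
              · exact le_of_lt (lt_of_lt_of_le (hmono i _ hi hmlen h) (by omega))
              · have : i = (l + r) / 2 := by omega
                subst this; omega
            · exact hhi
        · next hge =>
            apply ihn ps q hmono l ((l + r) / 2) (by omega) (by omega) (by omega) hlo
            intro i hi him
            rcases Nat.lt_or_ge ((l + r) / 2) i with h | h
            · exact lt_trans (by omega) (hmono _ i hmlen hi h)
            · have : i = (l + r) / 2 := by omega
              subst this; omega
      · rw [dif_neg hlt]
        have : l = r := by omega
        exact (tw_length_eq ps q l (by omega) hlo (fun h => hhi l h (by omega))).symm

-- what A's per-query step computes, in terms of lastH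
theorem answer_eq_lastH (ps : List (Int × Int)) (q : Int)
    (hpw : (ps.map Prod.fst).Pairwise (· < ·)) :
    (if ((upperBsearch ps q 0 ps.length : Int) - 1) < 0 then (0 : Int)
     else (ps.getD ((upperBsearch ps q 0 ps.length : Int) - 1).toNat (0, 0)).2) = lastH ps q := by
  have hmono : ∀ i j (hi : i < ps.length) (hj : j < ps.length), i < j → ps[i].1 < ps[j].1 := by
    intro i j hi hj hij
    have := List.pairwise_iff_getElem.mp hpw i j (by simpa using hi) (by simpa using hj) hij
    simpa using this
  have hub : upperBsearch ps q 0 ps.length = (ps.takeWhile (fun p => decide (p.1 ≤ q))).length :=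
    ub_spec ps.length ps q hmono 0 ps.length (by omega) (by omega) le_rfl
      (fun i h him => by omega) (fun i h hr => by omega)
  rw [hub]
  set tw := ps.takeWhile (fun p => decide (p.1 ≤ q)) with htw
  have htwlen : tw.length ≤ ps.length := (List.takeWhile_prefix _).length_le
  cases hhl : tw.length with
  | zero =>
      rw [if_pos (by omega)]
      unfold lastH
      rw [← htw, List.length_eq_zero_iff.mp hhl]
      rfl
  | succ m =>
      have hm : m < ps.length := by omega
      rw [if_neg (by omega)]
      have hidx : ((((m + 1 : Nat)) : Int) - 1).toNat = m := by omega
      rw [hidx, List.getD_eq_getElem ps (0, 0) hm]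
      unfold lastH
      rw [← htw]
      have hmtw : m < tw.length := by omega
      have hget : tw[m] = ps[m] := (List.takeWhile_prefix _).getElem hmtw
      rw [List.getLast?_eq_getElem?, hhl]
      simp only [Nat.add_sub_cancel]
      rw [List.getElem?_eq_getElem hmtw]
      simp [hget]

-- the table A builds from the (already sorted) keys is exactly the dict's items
theorem pairs_eq_items (d : PySem.Dict Int Int)
    (hpw : (d.items.map Prod.fst).Pairwise (· < ·)) :
    (PySem.List.sorted d.keys (fun x => x) false).foldl
        (fun ps k => ps ++ [(k, (d.get? k).getD 0)]) [] = d.items := by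
  have hkeys : PySem.Dict.keys d = d.items.map Prod.fst := by simp [PySem.Dict.keys]
  have hnd : d.keys.Nodup := by
    rw [hkeys]; exact hpw.imp (fun h => ne_of_lt h)
  rw [PySem.List.sorted_eq_self_of_pairwise _ _ (by rw [hkeys]; exact hpw.imp le_of_lt),
      PySem.List.foldl_append_singleton_eq_map, List.nil_append, hkeys, List.map_map]
  have : ∀ p ∈ d.items, ((fun k => (k, (d.get? k).getD 0)) ∘ Prod.fst) p = p := by
    intro p hp
    have := PySem.Dict.get?_of_mem_items d (k := p.1) (v := p.2) (by simpa using hp) hnd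
    simp [this]
  rw [List.map_congr_left this, List.map_id']

theorem lastH_final (steps : List Int) :
    (((steps.foldl stepA (0, 0, PySem.Dict.empty)).2.2.items.map Prod.fst).Pairwise (· < ·)) ∧
    (∀ q, lastH (steps.foldl stepA (0, 0, PySem.Dict.empty)).2.2.items q = altGo q 0 0 steps) := by
  have hemp : (PySem.Dict.empty : PySem.Dict Int Int).items = [] := rfl
  obtain ⟨hpw, hq⟩ := fold_inv steps 0 0 PySem.Dict.empty (by rw [hemp]; simp)
    (by rw [hemp]; simp) (Or.inr ⟨hemp, rfl⟩)
  refine ⟨hpw, fun q => ?_⟩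
  rw [hq q]
  by_cases h0 : (0 : Int) ≤ q
  · rw [if_pos h0]
  · rw [if_neg h0, altGo_of_lt _ _ _ _ (by omega)]
    have hemp : (PySem.Dict.empty : PySem.Dict Int Int).items = [] := rfl
    rw [hemp]
    rfl

-- ===== VERDICT (by name: the statement is the Claim_ definition above) =====
theorem solve_spec : Claim_equal_solve := by
  intro steps queries _
  simp only [Spec_solve, solve, solve_alt]
  obtain ⟨hpw, hlh⟩ := lastH_final steps
  rw [pairs_eq_items _ hpw]
  have hbody : ∀ (res : List Int) (q : Int),
      (fun res q =>
        let idx : Int := (upperBsearch (steps.foldl stepA (0, 0, PySem.Dict.empty)).2.2.items q 0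
            (steps.foldl stepA (0, 0, PySem.Dict.empty)).2.2.items.length : Int) - 1
        if idx < 0 then res ++ [0]
        else res ++ [((steps.foldl stepA (0, 0, PySem.Dict.empty)).2.2.items.getD idx.toNat (0, 0)).2]) res q
      = res ++ [altGo q 0 0 steps] := by
    intro res q
    simp only
    rw [← hlh q, ← answer_eq_lastH _ q hpw]
    split <;> rfl
  rw [funext fun res => funext fun q => hbody res q,
      PySem.List.foldl_append_singleton_eq_map, List.nil_append]
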